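-- pv_equiv track=rewrite | github.com/xaxy55/TradingAgents | tradingagents/dataflows/crypto_dataflows.py | is_crypto_symbol
-- ===== SOURCE A (Python) =====
-- def is_crypto_symbol(symbol: str) -> bool:
--     """
--     Detect if a symbol is likely a cryptocurrency.
--
--     Uses heuristics to determine if the given symbol represents
--     a cryptocurrency rather than a stock. For ambiguous symbols
--     that could be both, this function returns False to avoid
--     misrouting stock data.
--
--     Args:
--         symbol: Trading symbol to check
--
--     Returns:
--         bool: True if likely a cryptocurrency, False otherwise
--     """
--     # Common cryptocurrency symbols
--     crypto_symbols = {
--         'BTC', 'ETH', 'USDT', 'BNB', 'USDC', 'XRP', 'ADA', 'DOGE',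
--         'SOL', 'TRX', 'DOT', 'MATIC', 'LTC', 'SHIB', 'AVAX', 'UNI',
--         'LINK', 'XLM', 'ATOM', 'XMR', 'ETC', 'BCH', 'APT', 'FIL',
--         'ALGO', 'HBAR', 'QNT', 'LDO',
--     }
--
--     # Symbols that are known to collide with stock tickers.
--     # For these, we avoid confidently classifying them as crypto based
--     # solely on the bare symbol to reduce misrouting of stock data.
--     # Users should use get_crypto_price directly for these symbols.
--     ambiguous_symbols = {
--         'CRO',   # Crypto.com Coin vs Cron (stock ticker)
--         'ICP',   # Internet Computer vs Interceramic (stock ticker)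
--         'VET',   # VeChain vs Vermillion Energy (stock ticker)
--         'NEAR',  # NEAR Protocol vs potential stock ticker conflicts
--     }
--
--     symbol_upper = symbol.upper()
--
--     # If the symbol is known to be ambiguous, do not treat it as
--     # definitively crypto based only on the raw ticker.
--     if symbol_upper in ambiguous_symbols:
--         return False
--
--     # Check if it's in our known crypto list
--     if symbol_upper in crypto_symbols:
--         return True
--
--     # Check for common crypto suffixes/patterns
--     # Some exchanges use suffixes like BTCUSD, ETHUSD
--     for crypto in crypto_symbols:
--         if symbol_upper.startswith(crypto) and len(symbol_upper) > len(crypto):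
--             return True
--
--     return False
-- ===== SOURCE B (Python) =====
-- def is_crypto_symbol(symbol: str) -> bool:
--     """
--     Detect if a symbol is likely a cryptocurrency.
--
--     Same classification as the original: ambiguous tickers are never
--     crypto; otherwise the symbol is crypto iff some non-empty prefix
--     of it (including the whole symbol) is a known crypto symbol.
--     """
--     crypto_symbols = {
--         'BTC', 'ETH', 'USDT', 'BNB', 'USDC', 'XRP', 'ADA', 'DOGE',
--         'SOL', 'TRX', 'DOT', 'MATIC', 'LTC', 'SHIB', 'AVAX', 'UNI',
--         'LINK', 'XLM', 'ATOM', 'XMR', 'ETC', 'BCH', 'APT', 'FIL',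
--         'ALGO', 'HBAR', 'QNT', 'LDO',
--     }
--     ambiguous_symbols = {'CRO', 'ICP', 'VET', 'NEAR'}
--
--     symbol_upper = symbol.upper()
--     if symbol_upper in ambiguous_symbols:
--         return False
--     # 5 = length of the longest known crypto symbol; longer prefixes never match
--     n = min(len(symbol_upper), 5)
--     return any(symbol_upper[:i] in crypto_symbols for i in range(1, n + 1))
-- ===== Notes on version B (the rewrite author's own statement) =====
-- stated objective: simpler
-- what changed: Instead of an exact-membership test followed by a loop over all 28 crypto symbols with startswith and a length guard, B loops once over the non-empty prefixes (up to the maximum crypto-symbol length, 5) of the upper-cased symbol and tests each for set membership, folding the exact-match and suffix-pattern checks into one prefix lookup.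
import Mathlib
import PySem

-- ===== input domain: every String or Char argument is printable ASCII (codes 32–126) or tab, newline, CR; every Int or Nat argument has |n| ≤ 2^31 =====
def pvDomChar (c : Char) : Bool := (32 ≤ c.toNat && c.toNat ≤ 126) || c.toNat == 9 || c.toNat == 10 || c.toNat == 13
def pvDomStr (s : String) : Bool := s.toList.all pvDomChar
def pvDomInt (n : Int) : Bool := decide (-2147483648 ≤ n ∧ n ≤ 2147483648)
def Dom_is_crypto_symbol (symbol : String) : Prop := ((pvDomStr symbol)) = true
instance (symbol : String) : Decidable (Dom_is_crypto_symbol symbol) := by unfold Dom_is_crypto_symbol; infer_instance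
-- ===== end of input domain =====

-- B replaces A's scan over all 28 crypto symbols (startswith + length guard) by one
-- pass over the non-empty prefixes of the upper-cased symbol, each tested for set
-- membership; objective: simpler.

-- ===== PORT A =====
-- the set literals of A, as PySem sets (all elements distinct)
def pvCryptoSymbols : List String :=
  PySem.Set.ofList
    ["BTC", "ETH", "USDT", "BNB", "USDC", "XRP", "ADA", "DOGE",
     "SOL", "TRX", "DOT", "MATIC", "LTC", "SHIB", "AVAX", "UNI",
     "LINK", "XLM", "ATOM", "XMR", "ETC", "BCH", "APT", "FIL",
     "ALGO", "HBAR", "QNT", "LDO"]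

def pvAmbiguousSymbols : List String := PySem.Set.ofList ["CRO", "ICP", "VET", "NEAR"]

def is_crypto_symbol (symbol : String) : Bool :=
  let symbol_upper := PySem.Str.upper symbol
  if PySem.Set.contains pvAmbiguousSymbols symbol_upper then false
  else if PySem.Set.contains pvCryptoSymbols symbol_upper then true
  else
    -- 'for crypto in crypto_symbols: if …: return True' then 'return False'
    pvCryptoSymbols.any (fun crypto =>
      PySem.Str.startswith symbol_upper crypto &&
        decide (PySem.Str.len crypto < PySem.Str.len symbol_upper))

-- ===== PORT B =====
def is_crypto_symbol_alt (symbol : String) : Bool :=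
  let symbol_upper := PySem.Str.upper symbol
  if PySem.Set.contains pvAmbiguousSymbols symbol_upper then false
  else
    -- n = min(len(symbol_upper), 5); any(symbol_upper[:i] in crypto_symbols for i in range(1, n+1))
    let n := min (PySem.Str.len symbol_upper) 5
    (PySem.List.pyRange 1 (n + 1) 1).any (fun i =>
      PySem.Set.contains pvCryptoSymbols (PySem.Str.slice symbol_upper none (some i)))

-- ===== PRECONDITION & SPEC =====
def Spec_is_crypto_symbol (symbol : String) (out : Bool) : Prop := out = is_crypto_symbol_alt symbol
instance (symbol : String) (out : Bool) : Decidable (Spec_is_crypto_symbol symbol out) := by unfold Spec_is_crypto_symbol; infer_instance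

-- ===== CLAIM (what is proved, stated in full; the proofs are below) =====
def Claim_equal_is_crypto_symbol : Prop := ∀ (symbol : String), Dom_is_crypto_symbol symbol → Spec_is_crypto_symbol symbol (is_crypto_symbol symbol)

-- ===== LEMMAS AND PROOFS =====

-- every crypto symbol is non-empty
lemma pvCrypto_length_pos : ∀ c ∈ pvCryptoSymbols, 0 < c.toList.length ∧ c.toList.length ≤ 5 := by decide

-- slicing a string to a Nat bound is taking that many characters
lemma pvSlice_toList (u : String) (k : Nat) :
    (PySem.Str.slice u none (some (k : Int))).toList = u.toList.take k := by
  simp [PySem.Str.slice, PySem.List.slice_to_natCast]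

-- the core equivalence: A's membership-or-proper-prefix test equals B's prefix scan
lemma pvCore (u : String) :
    (if PySem.Set.contains pvCryptoSymbols u then true
     else pvCryptoSymbols.any (fun crypto =>
       PySem.Str.startswith u crypto && decide (PySem.Str.len crypto < PySem.Str.len u)))
    = (PySem.List.pyRange 1 (min (PySem.Str.len u) 5 + 1) 1).any (fun i =>
        PySem.Set.contains pvCryptoSymbols (PySem.Str.slice u none (some i))) := by
  rw [Bool.eq_iff_iff]
  constructor
  · intro h
    split_ifs at h with hmem
    · -- u itself is a crypto symbol: take i = len u
      rw [PySem.Set.contains_iff] at hmem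
      have hlen := pvCrypto_length_pos u hmem
      rw [List.any_eq_true]
      refine ⟨(u.toList.length : Int), ?_, ?_⟩
      · rw [PySem.List.mem_pyRange_one]
        obtain ⟨h1, h2⟩ := hlen
        simp only [PySem.Str.len_eq]
        constructor <;> omega
      · rw [show ((u.toList.length : Int)) = ((u.toList.length : Nat) : Int) from rfl]
        have : (PySem.Str.slice u none (some (u.toList.length : Int))).toList
            = u.toList := by rw [pvSlice_toList]; simp
        have hu : PySem.Str.slice u none (some (u.toList.length : Int)) = u := by
          apply String.toList_injective; exact this
        rw [hu, PySem.Set.contains_iff]; exact hmem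
    · -- some crypto symbol is a proper prefix: take i = its length
      rw [List.any_eq_true] at h
      obtain ⟨c, hc, hcc⟩ := h
      rw [Bool.and_eq_true, decide_eq_true_iff] at hcc
      obtain ⟨hsw, hlt⟩ := hcc
      rw [PySem.Str.startswith_eq, PySem.Chars.startswith_iff] at hsw
      simp only [PySem.Str.len_eq] at hlt
      rw [List.any_eq_true]
      refine ⟨(c.toList.length : Int), ?_, ?_⟩
      · rw [PySem.List.mem_pyRange_one]
        obtain ⟨h1, h2⟩ := pvCrypto_length_pos c hc
        simp only [PySem.Str.len_eq]
        constructor <;> omega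
      · have hcu : PySem.Str.slice u none (some (c.toList.length : Int)) = c := by
          apply String.toList_injective
          rw [pvSlice_toList]
          exact (List.prefix_iff_eq_take.mp hsw).symm
        rw [hcu, PySem.Set.contains_iff]; exact hc
  · intro h
    rw [List.any_eq_true] at h
    obtain ⟨i, hi, hmem⟩ := h
    rw [PySem.List.mem_pyRange_one] at hi
    simp only [PySem.Str.len_eq] at hi
    obtain ⟨k, hk⟩ : ∃ k : Nat, i = (k : Int) := ⟨i.toNat, by omega⟩
    subst hk
    rw [PySem.Set.contains_iff] at hmem
    have hktake : (PySem.Str.slice u none (some (k : Int))).toList = u.toList.take k :=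
      pvSlice_toList u k
    by_cases hfull : u.toList.length ≤ k
    · -- the whole string: A's membership branch fires
      have hu : PySem.Str.slice u none (some (k : Int)) = u := by
        apply String.toList_injective
        rw [hktake, List.take_of_length_le hfull]
      rw [hu] at hmem
      rw [if_pos ((PySem.Set.contains_iff _ _).mpr hmem)]
    · -- a proper prefix: A's loop fires
      rw [Nat.not_le] at hfull
      split_ifs with hmemu
      · rfl
      · rw [List.any_eq_true]
        refine ⟨PySem.Str.slice u none (some (k : Int)), hmem, ?_⟩
        rw [Bool.and_eq_true, decide_eq_true_iff]
        constructor
        · rw [PySem.Str.startswith_eq, PySem.Chars.startswith_iff, hktake]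
          exact List.take_prefix k u.toList
        · simp only [PySem.Str.len_eq, hktake]
          have : (u.toList.take k).length = k := by
            rw [List.length_take]; omega
          rw [this]; exact_mod_cast hfull

-- ===== VERDICT (by name: the statement is the Claim_ definition above) =====
theorem is_crypto_symbol_spec : Claim_equal_is_crypto_symbol := by
  intro symbol _
  simp only [Spec_is_crypto_symbol, is_crypto_symbol, is_crypto_symbol_alt]
  by_cases hamb : PySem.Set.contains pvAmbiguousSymbols (PySem.Str.upper symbol) = true
  · rw [if_pos hamb, if_pos hamb]
  · rw [if_neg hamb, if_neg hamb]
    exact pvCore (PySem.Str.upper symbol)
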